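-- pv_equiv track=rewrite | github.com/Lirkalyn2/GOMOKU_CAU | ai.py | diagonalScore
-- ===== SOURCE A (Python) =====
-- def diagonalScore(matrix):
--     lenght = len(matrix)
--     score = 0
--     res = { "d1": [], "d2": [], "d3": [], "d4": [] }
--
--     for i in range(4, lenght):
--         for key in res:
--             res[key] = { "streak": 0, "current": 0, "score": 0 }
--
--         for j in range(i):
--                 x = i-j
--                 y = j
--                 res["d1"] = process(matrix[x][y], res["d1"])
--
--                 x = lenght-1-j
--                 y = i-j
--                 res["d2"] = process(matrix[x][y], res["d2"])
--
--                 x = j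
--                 y = lenght-1-i+j
--                 res["d3"] = process(matrix[x][y], res["d3"])
--
--                 x = lenght-1-i
--                 y = lenght - 1 - j
--                 res["d4"] = process(matrix[x][y], res["d4"])
--
--         score += res["d1"]["score"] + res["d2"]["score"] + res["d3"]["score"] + res["d4"]["score"]
--     return -1 * score # shouldn't it be one more to the left ?? (to return when "for i in range(4, lenght)" is done)
--
-- def scoreConsecutive(block, current, streak, score):
--     if block != current:
--         if current == 0:
--             current = block
--             streak = 1
--         else:
--             score += current * adjacentBlockScore(streak)
--             current = block
--             streak = 1
--     else:
--         if block != 0: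
--             streak += 1
--
--     return (current, streak, score)
--
-- def adjacentBlockScore(count):
--     scoreMatrix = [0, 2, 4, 8, 16, 32]
--     try:
--         return scoreMatrix[count]
--     except:
--         return -1
--
-- def process(block, obj): # why streak and current are swapped here?
--     (a, b, c) = scoreConsecutive(block, obj["current"], obj["streak"], obj["score"])
--     tock = { "current": a, "streak": b, "score": c }
--     return tock
-- ===== SOURCE B (Python) =====
-- def diagonalScore(matrix):
--     lenght = len(matrix)
--     total = 0
--     for i in range(4, lenght):
--         diags = (
--             [matrix[i - j][j] for j in range(i)],
--             [matrix[lenght - 1 - j][i - j] for j in range(i)],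
--             [matrix[j][lenght - 1 - i + j] for j in range(i)],
--             [matrix[lenght - 1 - i][lenght - 1 - j] for j in range(i)],
--         )
--         total += _lineScore(diags[0]) + _lineScore(diags[1]) + _lineScore(diags[2]) + _lineScore(diags[3])
--     return -total
--
-- def _runs(values):
--     # run-length encoding: maximal runs of equal values, in order
--     runs = []
--     for v in values:
--         if runs and runs[-1][0] == v:
--             runs[-1][1] += 1
--         else:
--             runs.append([v, 1])
--     return runs
--
-- def _lineScore(values):
--     # every nonzero run except the trailing one gets flushed in the original scoring
--     runs = _runs(values)
--     return sum(v * _tab(L) for v, L in runs[:-1] if v != 0)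
--
-- def _tab(L):
--     t = [0, 2, 4, 8, 16, 32]
--     return t[L] if 0 <= L < 6 else -1
-- ===== Notes on version B (the rewrite author's own statement) =====
-- stated objective: alternative
-- what changed: B replaces A's interleaved streak-state machine (current/streak/score threaded through process/scoreConsecutive per cell) with a run-length-encoding pass: each diagonal is materialised, grouped into maximal runs of equal values, and scored as the sum of v*table(len) over all nonzero runs except the trailing run (which A never flushes).
import Mathlib
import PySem

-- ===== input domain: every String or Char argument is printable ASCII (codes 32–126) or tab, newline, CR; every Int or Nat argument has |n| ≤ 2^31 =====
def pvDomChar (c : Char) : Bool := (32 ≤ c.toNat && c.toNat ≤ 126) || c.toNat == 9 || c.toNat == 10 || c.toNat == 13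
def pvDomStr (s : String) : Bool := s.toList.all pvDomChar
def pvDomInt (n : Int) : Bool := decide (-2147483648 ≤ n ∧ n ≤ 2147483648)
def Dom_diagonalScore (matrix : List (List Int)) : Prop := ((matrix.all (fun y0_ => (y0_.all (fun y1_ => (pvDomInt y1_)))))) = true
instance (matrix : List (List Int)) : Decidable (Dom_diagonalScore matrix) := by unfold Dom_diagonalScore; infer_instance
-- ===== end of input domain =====

-- B scores each diagonal by run-length encoding (group into maximal runs, then sum over all
-- nonzero runs except the trailing one) instead of A's per-cell streak-state machine; same cost.


-- matrix[x][y]; total form, exact on inputs admitted by Pre_ (all accesses in range)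
def pvCell (matrix : List (List Int)) (x y : Int) : Int :=
  (PySem.List.pyGet? ((PySem.List.pyGet? matrix x).getD []) y).getD 0

-- ===== PORT A =====
def adjacentBlockScore (count : Int) : Int :=
  -- try: scoreMatrix[count] except: -1  (pyGet? = none exactly where Python raises)
  (PySem.List.pyGet? ([0, 2, 4, 8, 16, 32] : List Int) count).getD (-1)

def scoreConsecutive (block current streak score : Int) : Int × Int × Int :=
  if block ≠ current then
    if current = 0 then (block, 1, score)
    else (block, 1, score + current * adjacentBlockScore streak)
  else
    if block ≠ 0 then (current, streak + 1, score)
    else (current, streak, score)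

-- obj = (current, streak, score), the three dict fields
def process (block : Int) (obj : Int × Int × Int) : Int × Int × Int :=
  scoreConsecutive block obj.1 obj.2.1 obj.2.2

def diagonalScore (matrix : List (List Int)) : Int :=
  let lenght : Int := matrix.length
  -- res = {"d1": …, "d4": …} modelled as a 4-tuple (the initial lists are overwritten before use)
  let score : Int :=
    (PySem.List.pyRange 4 lenght 1).foldl (fun score i =>
      let res :=
        (PySem.List.pyRange 0 i 1).foldl
          (fun (res : (Int×Int×Int)×(Int×Int×Int)×(Int×Int×Int)×(Int×Int×Int)) j =>
            (process (pvCell matrix (i - j) j) res.1,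
             process (pvCell matrix (lenght - 1 - j) (i - j)) res.2.1,
             process (pvCell matrix j (lenght - 1 - i + j)) res.2.2.1,
             process (pvCell matrix (lenght - 1 - i) (lenght - 1 - j)) res.2.2.2))
          ((0,0,0), (0,0,0), (0,0,0), (0,0,0))
      score + res.1.2.2 + res.2.1.2.2 + res.2.2.1.2.2 + res.2.2.2.2.2) 0;
  -1 * score

-- ===== PORT B =====
-- _tab from Source B
def tabScore (L : Int) : Int :=
  let t : List Int := [0, 2, 4, 8, 16, 32]
  if 0 ≤ L ∧ L < 6 then (PySem.List.pyGet? t L).getD (-1) else -1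

-- the body of _runs' loop: extend the last run or start a new one
def runStep (runs : List (Int × Int)) (v : Int) : List (Int × Int) :=
  match runs.getLast? with
  | some p => if p.1 = v then runs.dropLast ++ [(p.1, p.2 + 1)] else runs ++ [(v, 1)]
  | none => [(v, 1)]

def pvRuns (values : List Int) : List (Int × Int) :=
  values.foldl runStep []

-- sum(v * _tab(L) for v, L in rs if v != 0)
def runsSum (rs : List (Int × Int)) : Int :=
  (rs.filter (fun p => decide (p.1 ≠ 0))).foldl (fun s p => s + p.1 * tabScore p.2) 0

def lineScore (values : List Int) : Int :=
  runsSum (pvRuns values).dropLast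

def diagonalScore_alt (matrix : List (List Int)) : Int :=
  let lenght : Int := matrix.length
  let total : Int :=
    (PySem.List.pyRange 4 lenght 1).foldl (fun total i =>
      let d1 := (PySem.List.pyRange 0 i 1).map (fun j => pvCell matrix (i - j) j)
      let d2 := (PySem.List.pyRange 0 i 1).map (fun j => pvCell matrix (lenght - 1 - j) (i - j))
      let d3 := (PySem.List.pyRange 0 i 1).map (fun j => pvCell matrix j (lenght - 1 - i + j))
      let d4 := (PySem.List.pyRange 0 i 1).map (fun j => pvCell matrix (lenght - 1 - i) (lenght - 1 - j))
      total + (lineScore d1 + lineScore d2 + lineScore d3 + lineScore d4)) 0;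
  -total

-- ===== PRECONDITION & SPEC =====
-- Pre_ = exactly the inputs where Python A returns: every matrix[x][y] access of the loop is in
-- range (row indices are always in range; only the column bounds can fail, raising IndexError).
def Pre_diagonalScore (matrix : List (List Int)) : Prop :=
  ∀ i ∈ PySem.List.pyRange 4 (matrix.length : Int) 1, ∀ j ∈ PySem.List.pyRange 0 i 1,
    j < (((PySem.List.pyGet? matrix (i - j)).getD []).length : Int) ∧
    i - j < (((PySem.List.pyGet? matrix ((matrix.length : Int) - 1 - j)).getD []).length : Int) ∧
    (matrix.length : Int) - 1 - i + j < (((PySem.List.pyGet? matrix j).getD []).length : Int) ∧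
    (matrix.length : Int) - 1 - j < (((PySem.List.pyGet? matrix ((matrix.length : Int) - 1 - i)).getD []).length : Int)
instance (matrix : List (List Int)) : Decidable (Pre_diagonalScore matrix) := by
  unfold Pre_diagonalScore; infer_instance

def pvWitness_diagonalScore : List (List Int) :=
  [[0,1,0,0,2],[1,1,0,0,0],[0,0,2,0,0],[0,2,0,1,0],[2,0,0,0,1]]

def Spec_diagonalScore (matrix : List (List Int)) (out : Int) : Prop := out = diagonalScore_alt matrix
instance (matrix : List (List Int)) (out : Int) : Decidable (Spec_diagonalScore matrix out) := by unfold Spec_diagonalScore; infer_instance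

-- ===== CLAIM (what is proved, stated in full; the proofs are below) =====
def Claim_equal_diagonalScore : Prop := ∀ (matrix : List (List Int)), Dom_diagonalScore matrix → Pre_diagonalScore matrix → Spec_diagonalScore matrix (diagonalScore matrix)

-- ===== LEMMAS AND PROOFS =====

lemma tab_eq (c : Int) (h : 0 ≤ c) : adjacentBlockScore c = tabScore c := by
  unfold adjacentBlockScore tabScore
  by_cases h6 : c < 6
  · simp [h, h6]
  · have hn : PySem.List.pyGet? ([0, 2, 4, 8, 16, 32] : List Int) c = none := by
      rw [PySem.List.pyGet?_eq_none_iff]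
      simp only [PySem.Raise.InRange, List.length_cons, List.length_nil]
      push_cast
      omega
    simp [hn, h6]

lemma runsSum_concat (rs : List (Int × Int)) (a b : Int) :
    runsSum (rs ++ [(a, b)]) = runsSum rs + (if a ≠ 0 then a * tabScore b else 0) := by
  unfold runsSum
  rw [List.filter_append]
  by_cases ha : a = 0
  · simp [ha]
  · simp [ha, List.foldl_append]

-- StInv: the invariant linking A's per-cell state to B's run list
def StInv (runs : List (Int × Int)) (st : Int × Int × Int) : Prop :=
  st.1 = ((runs.getLast?).map Prod.fst).getD 0 ∧
  (st.1 ≠ 0 → (runs.getLast?).map Prod.snd = some st.2.1) ∧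
  0 ≤ st.2.1 ∧
  st.2.2 = runsSum runs.dropLast

lemma dropLast_concat' (l : List (Int × Int)) (x : Int × Int) : (l ++ [x]).dropLast = l := by
  simp

lemma inv_step (v : Int) (runs : List (Int × Int)) (st : Int × Int × Int) (h : StInv runs st) :
    StInv (runStep runs v) (process v st) := by
  obtain ⟨c, s, sc⟩ := st
  obtain ⟨h1, h2, h3, h4⟩ := h
  simp only at h1 h2 h3 h4
  unfold runStep process scoreConsecutive
  cases hl : runs.getLast? with
  | none =>
      have hnil : runs = [] := List.getLast?_eq_none_iff.mp hl
      subst hnil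
      simp only [hl, Option.map_none, Option.getD_none] at h1
      subst h1
      by_cases hv : v = 0
      · subst hv; simp_all [StInv, runsSum]
      · simp_all [StInv, runsSum]
  | some p =>
      obtain ⟨rv, rc⟩ := p
      simp only [hl, Option.map_some, Option.getD_some] at h1
      subst h1
      have hruns : runs.dropLast ++ [(c, rc)] = runs := by
        have hne : runs ≠ [] := by
          intro hh; rw [hh] at hl; simp at hl
        have h5 := List.dropLast_append_getLast hne
        have h6 : runs.getLast hne = (c, rc) := by
          have h7 := List.getLast?_eq_some_getLast (l := runs) hne
          rw [hl] at h7
          exact (Option.some_inj.mp h7).symm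
        rw [h6] at h5; exact h5
      simp only [hl]
      by_cases hv : v = c
      · -- same value: extend the last run
        rw [if_pos (show (c, rc).1 = v from hv.symm),
            if_neg (show ¬ (v ≠ c) from fun hh => hh hv)]
        by_cases hv0 : v = 0
        · rw [if_neg (show ¬ (v ≠ 0) from fun hh => hh hv0)]
          unfold StInv
          refine ⟨by simp, ?_, h3, by simpa using h4⟩
          intro hc; exact absurd (hv ▸ hv0) hc
        · have hs : rc = s := by
            have hx := h2 (hv ▸ hv0)
            rw [hl] at hx
            simpa using hx
          rw [if_pos (show v ≠ 0 from hv0)]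
          unfold StInv
          refine ⟨by simpa using hv.symm, ?_, by show (0:Int) ≤ s + 1; omega, by simpa using h4⟩
          intro _
          simp [hs]
      · -- different value: close the last run, start a new one
        rw [if_neg (show ¬ (c, rc).1 = v from fun hh => hv hh.symm),
            if_pos (show v ≠ c from hv)]
        by_cases hc0 : c = 0
        · rw [if_pos hc0]
          unfold StInv
          refine ⟨by simp, fun _ => by simp, by norm_num, ?_⟩
          rw [dropLast_concat', ← hruns, runsSum_concat]
          simp [hc0, h4]
        · have hs : rc = s := by
            have hx := h2 hc0
            rw [hl] at hx
            simpa using hx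
          rw [if_neg hc0]
          unfold StInv
          refine ⟨by simp, fun _ => by simp, by norm_num, ?_⟩
          rw [dropLast_concat', ← hruns, runsSum_concat]
          simp [h4, hc0, hs, tab_eq s h3]

lemma inv_fold (values : List Int) (runs : List (Int × Int)) (st : Int × Int × Int)
    (h : StInv runs st) :
    StInv (values.foldl runStep runs) (values.foldl (fun s v => process v s) st) := by
  induction values generalizing runs st with
  | nil => exact h
  | cons a t ih =>
      simp only [List.foldl_cons]
      exact ih _ _ (inv_step a runs st h)

lemma lineScore_eq_fold (values : List Int) :
    lineScore values = (values.foldl (fun s v => process v s) (0, 0, 0)).2.2 := by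
  have h0 : StInv [] ((0 : Int), (0 : Int), (0 : Int)) := by
    refine ⟨by simp, by simp, le_refl _, by simp [runsSum]⟩
  have := (inv_fold values [] (0, 0, 0) h0).2.2.2
  unfold lineScore pvRuns
  rw [this]

lemma lineScore_map (js : List Int) (v : Int → Int) :
    lineScore (js.map v) = (js.foldl (fun s j => process (v j) s) (0, 0, 0)).2.2 := by
  rw [lineScore_eq_fold, List.foldl_map]

lemma fold_split (js : List Int) (v1 v2 v3 v4 : Int → Int)
    (s1 s2 s3 s4 : Int × Int × Int) :
    js.foldl (fun (res : (Int×Int×Int)×(Int×Int×Int)×(Int×Int×Int)×(Int×Int×Int)) j =>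
        (process (v1 j) res.1, process (v2 j) res.2.1,
         process (v3 j) res.2.2.1, process (v4 j) res.2.2.2)) (s1, s2, s3, s4)
      = (js.foldl (fun s j => process (v1 j) s) s1,
         js.foldl (fun s j => process (v2 j) s) s2,
         js.foldl (fun s j => process (v3 j) s) s3,
         js.foldl (fun s j => process (v4 j) s) s4) := by
  induction js generalizing s1 s2 s3 s4 with
  | nil => rfl
  | cons a t ih => simp only [List.foldl_cons]; exact ih _ _ _ _

lemma foldl_ext {A B : Type} (f g : A → B → A) (l : List B) (init : A)
    (h : ∀ a b, f a b = g a b) : l.foldl f init = l.foldl g init := by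
  have hf : f = g := funext fun a => funext fun b => h a b
  rw [hf]

-- ===== VERDICT (by name: the statement is the Claim_ definition above) =====
theorem diagonalScore_spec : Claim_equal_diagonalScore := by
  intro matrix _ _
  unfold Spec_diagonalScore diagonalScore diagonalScore_alt
  simp only []
  rw [neg_one_mul]
  congr 1
  apply foldl_ext
  intro acc i
  rw [fold_split]
  simp only [lineScore_map]
  ring
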